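-- pv_equiv track=rewrite | github.com/xiaofaqian/lief-mcp-server | tools/list_macho_segments.py | _get_protection_description
-- ===== SOURCE A (Python) =====
-- from typing import Annotated, Dict, Any, List
--
-- def _parse_protection_flags(protection: int) -> List[str]:
--     """解析保护标志位"""
--     flags = []
--
--     if protection & 0x1:  # VM_PROT_READ
--         flags.append("READ")
--     if protection & 0x2:  # VM_PROT_WRITE
--         flags.append("WRITE")
--     if protection & 0x4:  # VM_PROT_EXECUTE
--         flags.append("EXECUTE")
--
--     return flags if flags else ["NONE"]
--
-- def _get_protection_description(protection: int) -> str: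
--     """获取保护标志的描述"""
--     flags = _parse_protection_flags(protection)
--
--     if flags == ["NONE"]:
--         return "无权限"
--
--     descriptions = {
--         "READ": "可读",
--         "WRITE": "可写",
--         "EXECUTE": "可执行"
--     }
--
--     desc_list = [descriptions.get(flag, flag) for flag in flags]
--     return " | ".join(desc_list)
-- ===== SOURCE B (Python) =====
-- _PROT_DESCRIPTIONS = (
--     "无权限",
--     "可读",
--     "可写",
--     "可读 | 可写",
--     "可执行",
--     "可读 | 可执行",
--     "可写 | 可执行",
--     "可读 | 可写 | 可执行",
-- )
--
-- def _get_protection_description(protection: int) -> str: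
--     """获取保护标志的描述"""
--     return _PROT_DESCRIPTIONS[protection & 0x7]
-- ===== Notes on version B (the rewrite author's own statement) =====
-- stated objective: alternative
-- what changed: Replaced A's two-stage parse-then-map pipeline (build English flag list, dict-translate, join) by a direct lookup of protection's low three permission bits in a precomputed table of final description strings: no flag list, no dict, no join, no NONE sentinel.
import Mathlib
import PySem

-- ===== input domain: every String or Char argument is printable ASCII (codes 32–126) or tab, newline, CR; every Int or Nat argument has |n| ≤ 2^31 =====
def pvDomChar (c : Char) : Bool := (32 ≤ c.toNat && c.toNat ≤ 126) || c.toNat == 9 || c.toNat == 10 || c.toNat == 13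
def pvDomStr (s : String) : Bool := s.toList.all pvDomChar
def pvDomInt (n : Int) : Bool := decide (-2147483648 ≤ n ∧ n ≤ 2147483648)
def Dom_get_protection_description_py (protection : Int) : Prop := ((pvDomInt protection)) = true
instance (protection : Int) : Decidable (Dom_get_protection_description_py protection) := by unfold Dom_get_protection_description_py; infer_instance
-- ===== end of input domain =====

-- B replaces A's parse-then-translate-then-join pipeline by a direct lookup of (protection & 7) in a precomputed table of final strings (alternative decomposition, same behaviour).


-- ===== PORT A =====
def parse_protection_flags_py (protection : Int) : List String :=
  let flags : List String := []
  let flags := if PySem.Int.band protection 1 != 0 then flags ++ ["READ"] else flags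
  let flags := if PySem.Int.band protection 2 != 0 then flags ++ ["WRITE"] else flags
  let flags := if PySem.Int.band protection 4 != 0 then flags ++ ["EXECUTE"] else flags
  if flags != [] then flags else ["NONE"]

def get_protection_description_py (protection : Int) : String :=
  let flags := parse_protection_flags_py protection
  if flags == ["NONE"] then "无权限"
  else
    let descriptions : PySem.Dict String String :=
      PySem.Dict.ofList [("READ", "可读"), ("WRITE", "可写"), ("EXECUTE", "可执行")]
    PySem.Str.join " | " (flags.map (fun flag => descriptions.getD flag flag))

-- ===== PORT B =====
def protDescriptionsTable : List String :=
  ["无权限", "可读", "可写", "可读 | 可写", "可执行", "可读 | 可执行", "可写 | 可执行", "可读 | 可写 | 可执行"]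

def get_protection_description_py_alt (protection : Int) : String :=
  -- the tuple index (the low three bits) is always in range, so the .getD default is unreachable
  (PySem.List.pyGet? protDescriptionsTable (PySem.Int.band protection 7)).getD ""

-- ===== PRECONDITION & SPEC =====
def Spec_get_protection_description_py (protection : Int) (out : String) : Prop := out = get_protection_description_py_alt protection
instance (protection : Int) (out : String) : Decidable (Spec_get_protection_description_py protection out) := by unfold Spec_get_protection_description_py; infer_instance

-- ===== CLAIM (what is proved, stated in full; the proofs are below) =====
def Claim_equal_get_protection_description_py : Prop := ∀ (protection : Int), Dom_get_protection_description_py protection → Spec_get_protection_description_py protection (get_protection_description_py protection)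

-- ===== LEMMAS AND PROOFS =====
lemma band_negSucc (m : Nat) (k : Nat) : PySem.Int.band (Int.negSucc m) ↑k = ↑(k - (k &&& m)) := by
  unfold PySem.Int.band
  rw [if_neg (by omega), if_pos (by omega)]
  have h : (-(Int.negSucc m) - 1).toNat = m := by simp [Int.negSucc_eq]
  rw [h, Int.toNat_natCast]

lemma band_ofNat (n : Nat) (k : Nat) : PySem.Int.band (Int.ofNat n) ↑k = ↑(n &&& k) := by
  simp [Int.ofNat_eq_natCast]

lemma mask_of7_neg (m k : Nat) (hk : 7 &&& k = k) : (7 &&& m) &&& k = k &&& m := by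
  rw [Nat.land_comm 7 m, Nat.land_assoc, hk, Nat.land_comm]

lemma mask_of7_pos (n k : Nat) (hk : k &&& 7 = k) : (n &&& 7) &&& k = n &&& k := by
  rw [Nat.land_assoc, Nat.land_comm 7 k, hk]

-- ===== VERDICT (by name: the statement is the Claim_ definition above) =====
theorem get_protection_description_py_spec : Claim_equal_get_protection_description_py := by
  intro protection _
  unfold Spec_get_protection_description_py get_protection_description_py
    get_protection_description_py_alt parse_protection_flags_py
  cases protection with
  | ofNat n =>
    rw [show (1 : Int) = ((1 : Nat) : Int) from rfl, show (2 : Int) = ((2 : Nat) : Int) from rfl,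
        show (4 : Int) = ((4 : Nat) : Int) from rfl, show (7 : Int) = ((7 : Nat) : Int) from rfl,
        band_ofNat, band_ofNat, band_ofNat, band_ofNat,
        ← mask_of7_pos n 1 (by decide), ← mask_of7_pos n 2 (by decide),
        ← mask_of7_pos n 4 (by decide)]
    have hs : n &&& 7 ≤ 7 := Nat.and_le_right
    set s := n &&& 7 with hsdef
    clear_value s
    interval_cases s <;> decide
  | negSucc m =>
    rw [show (1 : Int) = ((1 : Nat) : Int) from rfl, show (2 : Int) = ((2 : Nat) : Int) from rfl,
        show (4 : Int) = ((4 : Nat) : Int) from rfl, show (7 : Int) = ((7 : Nat) : Int) from rfl,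
        band_negSucc, band_negSucc, band_negSucc, band_negSucc,
        ← mask_of7_neg m 1 (by decide), ← mask_of7_neg m 2 (by decide),
        ← mask_of7_neg m 4 (by decide)]
    have hs : 7 &&& m ≤ 7 := Nat.and_le_left
    set s := 7 &&& m with hsdef
    clear_value s
    interval_cases s <;> decide
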